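-- pv_equiv track=rewrite | github.com/flarnrules/towers | collections/2-proto_towers/code/scripts/generate_collision_map.py | create_sequenced_collision_map
-- ===== SOURCE A (Python) =====
-- def create_sequenced_collision_map(collision_map):
--     sequence_number = 1
--     sequenced_map = []
--     for row in collision_map:
--         sequenced_row = []
--         for cell in row:
--             if cell:  # Walkable
--                 sequenced_row.append(sequence_number)
--                 sequence_number += 1
--             else:
--                 sequenced_row.append(0)  # Not walkable
--         sequenced_map.append(sequenced_row)
--     return sequenced_map
-- ===== SOURCE B (Python) =====
-- def create_sequenced_collision_map(collision_map):
--     # Flatten, prefix-sum the walkable flags, project, then reshape.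
--     flat = [cell for row in collision_map for cell in row]
--     scan = []
--     total = 0
--     for cell in flat:
--         total += 1 if cell else 0
--         scan.append(total)
--     flat_result = [s if c else 0 for c, s in zip(flat, scan)]
--     result = []
--     i = 0
--     for row in collision_map:
--         result.append(flat_result[i:i + len(row)])
--         i += len(row)
--     return result
-- ===== Notes on version B (the rewrite author's own statement) =====
-- stated objective: alternative
-- what changed: Replaces the threaded mutable counter in nested loops by a flatten + prefix-sum scan over walkable flags, projected onto walkable cells and reshaped back into the original row lengths.
import Mathlib
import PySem

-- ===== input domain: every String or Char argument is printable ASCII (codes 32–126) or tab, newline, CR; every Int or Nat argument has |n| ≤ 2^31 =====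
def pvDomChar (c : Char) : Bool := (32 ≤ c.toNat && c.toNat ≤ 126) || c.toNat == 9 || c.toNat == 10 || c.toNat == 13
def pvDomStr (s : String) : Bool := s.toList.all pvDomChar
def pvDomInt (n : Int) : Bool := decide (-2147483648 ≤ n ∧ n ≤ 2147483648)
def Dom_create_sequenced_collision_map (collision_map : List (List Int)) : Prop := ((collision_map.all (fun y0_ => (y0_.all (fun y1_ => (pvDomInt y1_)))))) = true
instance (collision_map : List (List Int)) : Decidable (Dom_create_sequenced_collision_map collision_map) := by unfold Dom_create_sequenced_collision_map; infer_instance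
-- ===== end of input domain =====

-- B replaces the threaded counter in nested loops by a flatten + prefix-sum scan projected
-- back onto the grid shape (objective: alternative decomposition, not faster).

-- ===== PORT A =====
-- A: nested loops threading a mutable sequence counter, appending to accumulators.
def create_sequenced_collision_map (collision_map : List (List Int)) : List (List Int) :=
  (collision_map.foldl
    (fun (st : Int × List (List Int)) row =>
      let inner := row.foldl
        (fun (st2 : Int × List Int) cell =>
          if cell ≠ 0 then (st2.1 + 1, st2.2 ++ [st2.1])
          else (st2.1, st2.2 ++ [0]))
        (st.1, [])
      (inner.1, st.2 ++ [inner.2]))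
    (1, [])).2

-- ===== PORT B =====
-- B: flatten, prefix-sum scan of walkable flags, project onto walkable cells, reshape.
def pvScanB (flat : List Int) : List Int :=
  (flat.foldl
    (fun (st : Int × List Int) cell =>
      let t := st.1 + (if cell ≠ 0 then 1 else 0)
      (t, st.2 ++ [t]))
    (0, [])).2

def pvReshapeB (rows : List (List Int)) (flatResult : List Int) : List (List Int) :=
  match rows with
  | [] => []
  | r :: rs => flatResult.take r.length :: pvReshapeB rs (flatResult.drop r.length)

def create_sequenced_collision_map_alt (collision_map : List (List Int)) : List (List Int) :=
  let flat := collision_map.flatMap id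
  let scan := pvScanB flat
  let flatResult := (flat.zip scan).map (fun p => if p.1 ≠ 0 then p.2 else 0)
  pvReshapeB collision_map flatResult

-- ===== PRECONDITION & SPEC =====
def Spec_create_sequenced_collision_map (collision_map : List (List Int)) (out : List (List Int)) : Prop := out = create_sequenced_collision_map_alt collision_map
instance (collision_map : List (List Int)) (out : List (List Int)) : Decidable (Spec_create_sequenced_collision_map collision_map out) := by unfold Spec_create_sequenced_collision_map; infer_instance

-- ===== CLAIM (what is proved, stated in full; the proofs are below) =====
def Claim_equal_create_sequenced_collision_map : Prop := ∀ (collision_map : List (List Int)), Dom_create_sequenced_collision_map collision_map → Spec_create_sequenced_collision_map collision_map (create_sequenced_collision_map collision_map)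

-- ===== LEMMAS AND PROOFS =====

-- number of walkable (nonzero) cells
def pvCW (cs : List Int) : Int := ((cs.filter (fun c => c ≠ 0)).length : Int)

-- reference: sequence numbers for a flat list starting at n
def pvSeqL (n : Int) : List Int → List Int
  | [] => []
  | c :: cs => if c = 0 then 0 :: pvSeqL n cs else n :: pvSeqL (n + 1) cs

-- reference: per-row version with running counter
def pvSeqM (n : Int) : List (List Int) → List (List Int)
  | [] => []
  | r :: rs => pvSeqL n r :: pvSeqM (n + pvCW r) rs

-- reference prefix scan starting at t
def pvScanR (t : Int) : List Int → List Int
  | [] => []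
  | c :: cs =>
    let t' := t + (if c = 0 then 0 else 1)
    t' :: pvScanR t' cs

theorem pvCW_nil : pvCW [] = 0 := by simp [pvCW]

theorem pvCW_cons (c : Int) (cs : List Int) :
    pvCW (c :: cs) = (if c = 0 then 0 else 1) + pvCW cs := by
  simp [pvCW, List.filter]
  split_ifs with h <;> simp_all <;> omega

theorem pvCW_append (xs ys : List Int) : pvCW (xs ++ ys) = pvCW xs + pvCW ys := by
  simp [pvCW]

theorem pvSeqL_length (n : Int) (cs : List Int) : (pvSeqL n cs).length = cs.length := by
  induction cs generalizing n with
  | nil => simp [pvSeqL]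
  | cons c cs ih => simp only [pvSeqL]; split_ifs <;> simp [ih]

theorem pvSeqL_append (n : Int) (xs ys : List Int) :
    pvSeqL n (xs ++ ys) = pvSeqL n xs ++ pvSeqL (n + pvCW xs) ys := by
  induction xs generalizing n with
  | nil => simp [pvSeqL, pvCW_nil]
  | cons c cs ih =>
    simp only [List.cons_append, pvSeqL, pvCW_cons]
    by_cases h : c = 0
    · simp [h, ih]
    · simp only [if_neg h]
      rw [ih]
      have : n + 1 + pvCW cs = n + (1 + pvCW cs) := by ring
      simp [this]

-- A's inner foldl computes pvSeqL with the running counter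
theorem portA_inner (row : List Int) (n : Int) (acc : List Int) :
    row.foldl
      (fun (st2 : Int × List Int) cell =>
        if cell = 0 then (st2.1, st2.2 ++ [0]) else (st2.1 + 1, st2.2 ++ [st2.1]))
      (n, acc) = (n + pvCW row, acc ++ pvSeqL n row) := by
  induction row generalizing n acc with
  | nil => simp [pvSeqL, pvCW_nil]
  | cons c cs ih =>
    by_cases h : c = 0 <;>
      simp [pvSeqL, pvCW_cons, h, ih, Prod.ext_iff] <;> omega

-- A's outer foldl computes pvSeqM (stated on the step already rewritten by portA_inner)
theorem portA_outer (rows : List (List Int)) (n : Int) (acc : List (List Int)) :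
    rows.foldl
      (fun (st : Int × List (List Int)) row =>
        (st.1 + pvCW row, st.2 ++ [pvSeqL st.1 row]))
      (n, acc) = (n + pvCW (rows.flatMap id), acc ++ pvSeqM n rows) := by
  induction rows generalizing n acc with
  | nil => simp [pvSeqM, pvCW_nil]
  | cons r rs ih =>
    simp only [List.foldl_cons, ih, pvSeqM, List.flatMap_cons, id, pvCW_append,
      Prod.ext_iff]
    constructor
    · omega
    · simp

theorem portA_eq (cm : List (List Int)) :
    create_sequenced_collision_map cm = pvSeqM 1 cm := by
  have hfun : (fun (st2 : Int × List Int) (cell : Int) =>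
      if cell ≠ 0 then (st2.1 + 1, st2.2 ++ [st2.1]) else (st2.1, st2.2 ++ [0]))
      = (fun (st2 : Int × List Int) cell =>
      if cell = 0 then (st2.1, st2.2 ++ [0]) else (st2.1 + 1, st2.2 ++ [st2.1])) := by
    funext st2 cell
    by_cases h : cell = 0 <;> simp [h]
  have hstep : (fun (st : Int × List (List Int)) (row : List Int) =>
      let inner := row.foldl
        (fun (st2 : Int × List Int) cell =>
          if cell = 0 then (st2.1, st2.2 ++ [0]) else (st2.1 + 1, st2.2 ++ [st2.1]))
        (st.1, [])
      (inner.1, st.2 ++ [inner.2]))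
      = (fun (st : Int × List (List Int)) row =>
      (st.1 + pvCW row, st.2 ++ [pvSeqL st.1 row])) := by
    funext st row
    simp [portA_inner]
  simp only [create_sequenced_collision_map, hfun, hstep, portA_outer]
  simp

-- B's scan foldl computes pvScanR
theorem pvScanB_aux (cs : List Int) (t : Int) (acc : List Int) :
    cs.foldl
      (fun (st : Int × List Int) cell =>
        ((st.1 + if cell = 0 then 0 else 1), st.2 ++ [st.1 + if cell = 0 then 0 else 1]))
      (t, acc) = (t + pvCW cs, acc ++ pvScanR t cs) := by
  induction cs generalizing t acc with
  | nil => simp [pvScanR, pvCW_nil]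
  | cons c cs ih =>
    simp only [List.foldl_cons, pvScanR, pvCW_cons, ih, Prod.ext_iff]
    constructor
    · omega
    · simp

theorem pvScanB_eq (cs : List Int) : pvScanB cs = pvScanR 0 cs := by
  have hfun : (fun (st : Int × List Int) (cell : Int) =>
      let t := st.1 + (if cell ≠ 0 then (1:Int) else 0)
      (t, st.2 ++ [t]))
      = (fun (st : Int × List Int) cell =>
      ((st.1 + if cell = 0 then 0 else 1), st.2 ++ [st.1 + if cell = 0 then 0 else 1])) := by
    funext st cell
    by_cases h : cell = 0 <;> simp [h]
  simp only [pvScanB, hfun, pvScanB_aux]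
  simp

-- projection of the scan onto walkable cells = reference sequence numbers
theorem proj_scan (cs : List Int) (t : Int) :
    (cs.zip (pvScanR t cs)).map (fun p => if p.1 = 0 then 0 else p.2)
      = pvSeqL (t + 1) cs := by
  induction cs generalizing t with
  | nil => simp [pvScanR, pvSeqL]
  | cons c cs ih =>
    simp only [pvScanR, pvSeqL, List.zip_cons_cons, List.map_cons]
    by_cases h : c = 0
    · simp [h, ih]
    · simp only [if_neg h]
      rw [ih (t + 1)]

-- reshaping the flat reference result recovers the per-row reference
theorem reshape_seq (rows : List (List Int)) (n : Int) :
    pvReshapeB rows (pvSeqL n (rows.flatMap id)) = pvSeqM n rows := by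
  induction rows generalizing n with
  | nil => simp [pvReshapeB, pvSeqM]
  | cons r rs ih =>
    have hsplit : pvSeqL n (List.flatMap id (r :: rs))
        = pvSeqL n r ++ pvSeqL (n + pvCW r) (rs.flatMap id) := by
      simp [List.flatMap_cons, pvSeqL_append]
    have hlen : (pvSeqL n r).length = r.length := pvSeqL_length n r
    simp only [pvReshapeB, pvSeqM, hsplit, List.cons.injEq]
    constructor
    · rw [← hlen, List.take_left]
    · rw [← hlen, List.drop_left, ih]

theorem portB_eq (cm : List (List Int)) :
    create_sequenced_collision_map_alt cm = pvSeqM 1 cm := by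
  have hmap : (fun (p : Int × Int) => if p.1 ≠ 0 then p.2 else 0)
      = (fun (p : Int × Int) => if p.1 = 0 then 0 else p.2) := by
    funext p
    by_cases h : p.1 = 0 <;> simp [h]
  simp only [create_sequenced_collision_map_alt, pvScanB_eq, hmap, proj_scan]
  have h01 : (0 : Int) + 1 = 1 := by ring
  rw [h01, reshape_seq]

-- ===== VERDICT (by name: the statement is the Claim_ definition above) =====
theorem create_sequenced_collision_map_spec : Claim_equal_create_sequenced_collision_map := by
  intro cm _
  unfold Spec_create_sequenced_collision_map
  rw [portA_eq, portB_eq]
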